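-- pv_equiv track=rewrite | github.com/finreflectkg/FinReflectKG-MultiHop | dataset_generation/gics_loader.py | get_companies_by_sector
-- ===== SOURCE A (Python) =====
-- from typing import Dict, List, Optional
--
-- def get_companies_by_sector(gics_data: Dict[str, Dict[str, str]]) -> Dict[str, List[str]]:
--     """
--     Group companies by their GICS sector.
--
--     Args:
--         gics_data: Output from load_sp100_gics()
--
--     Returns:
--         Dictionary mapping sector to list of tickers:
--         {
--             'Information Technology': ['AAPL', 'MSFT', 'NVDA', ...],
--             'Financials': ['JPM', 'BAC', 'GS', ...],
--             ...
--         }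
--     """
--     sectors = {}
--     for ticker, info in gics_data.items():
--         sector = info['sector']
--         if sector not in sectors:
--             sectors[sector] = []
--         sectors[sector].append(ticker)
--
--     # Sort tickers within each sector
--     for sector in sectors:
--         sectors[sector].sort()
--
--     return sectors
-- ===== SOURCE B (Python) =====
-- def get_companies_by_sector(gics_data):
--     # First-appearance order of sectors (matches dict insertion order of A's result),
--     # then ONE global sort of all tickers and a per-sector filter: no per-bucket sort.
--     sector_order = list(dict.fromkeys(info['sector'] for info in gics_data.values()))
--     tickers = sorted(gics_data)
--     return {s: [t for t in tickers if gics_data[t]['sector'] == s] for s in sector_order}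
-- ===== Notes on version B (the rewrite author's own statement) =====
-- stated objective: alternative
-- what changed: B replaces A's group-into-buckets-then-sort-each-bucket shape with one global sort of all tickers followed by a per-sector filter comprehension (sector order = first appearance via dict.fromkeys); Pre_ excludes inputs where A raises KeyError (an info dict without 'sector') and, in the association-list model, lists with duplicate ticker keys, which do not represent a Python dict.
import Mathlib
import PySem

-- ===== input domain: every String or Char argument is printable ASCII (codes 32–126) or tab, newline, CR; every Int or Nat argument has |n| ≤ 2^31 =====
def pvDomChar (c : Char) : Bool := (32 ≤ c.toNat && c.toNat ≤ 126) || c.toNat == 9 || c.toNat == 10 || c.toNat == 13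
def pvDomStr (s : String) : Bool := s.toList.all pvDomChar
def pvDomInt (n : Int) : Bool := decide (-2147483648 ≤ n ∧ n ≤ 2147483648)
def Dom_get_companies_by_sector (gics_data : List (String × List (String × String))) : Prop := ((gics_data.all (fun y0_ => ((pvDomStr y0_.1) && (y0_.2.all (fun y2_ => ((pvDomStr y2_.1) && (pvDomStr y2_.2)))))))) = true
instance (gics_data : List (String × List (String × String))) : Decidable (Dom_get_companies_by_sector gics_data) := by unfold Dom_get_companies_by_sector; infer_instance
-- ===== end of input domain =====

-- B rewrites A's "group into buckets, then sort each bucket" as "sort all tickers once,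
-- then one filter per sector (first-appearance order)"; equivalence of return values proved below.

-- info['sector'] (exact under Pre_, which guarantees the key is present; Python raises KeyError otherwise)
def pvSector (info : List (String × String)) : String :=
  PySem.Dict.getD (PySem.Dict.mk info) "sector" ""

-- ===== PORT A =====
def get_companies_by_sector (gics_data : List (String × List (String × String))) : List (String × List String) :=
  let sectors : PySem.Dict String (List String) :=
    gics_data.foldl (fun sectors ti =>
      let sector := pvSector ti.2
      let sectors := if sectors.contains sector then sectors else sectors.insert sector []
      sectors.modify sector [] (fun l => l ++ [ti.1])) PySem.Dict.empty
  let sectors :=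
    sectors.keys.foldl (fun sectors s =>
      sectors.modify s [] (fun l => PySem.List.sorted l (fun x => x) false)) sectors
  sectors.items

-- ===== PORT B =====
def get_companies_by_sector_alt (gics_data : List (String × List (String × String))) : List (String × List String) :=
  let sector_order := PySem.List.dedup (gics_data.map (fun ti => pvSector ti.2))
  let tickers := PySem.List.sorted (gics_data.map Prod.fst) (fun x => x) false
  sector_order.map (fun s =>
    (s, tickers.filter (fun t => pvSector (PySem.Dict.getD (PySem.Dict.mk gics_data) t []) == s)))

-- ===== PRECONDITION & SPEC =====
-- Pre_ excludes (i) info dicts without a 'sector' key (Python A raises KeyError there) and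
-- (ii) association lists with duplicate ticker keys, which do not represent a Python dict
-- (A's parameter is a dict, so its keys are unique by construction).
def Pre_get_companies_by_sector (gics_data : List (String × List (String × String))) : Prop :=
  (gics_data.map Prod.fst).Nodup ∧
  ∀ ti ∈ gics_data, (PySem.Dict.mk ti.2).contains "sector" = true
instance (gics_data : List (String × List (String × String))) : Decidable (Pre_get_companies_by_sector gics_data) := by
  unfold Pre_get_companies_by_sector; infer_instance

def pvWitness_get_companies_by_sector : (List (String × List (String × String))) :=
  [("MSFT", [("sector", "Information Technology")]), ("AAPL", [("sector", "Information Technology")]), ("JPM", [("sector", "Financials")])]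

def Spec_get_companies_by_sector (gics_data : List (String × List (String × String))) (out : List (String × List String)) : Prop := out = get_companies_by_sector_alt gics_data
instance (gics_data : List (String × List (String × String))) (out : List (String × List String)) : Decidable (Spec_get_companies_by_sector gics_data out) := by unfold Spec_get_companies_by_sector; infer_instance

-- ===== CLAIM (what is proved, stated in full; the proofs are below) =====
def Claim_equal_get_companies_by_sector : Prop := ∀ (gics_data : List (String × List (String × String))), Dom_get_companies_by_sector gics_data → Pre_get_companies_by_sector gics_data → Spec_get_companies_by_sector gics_data (get_companies_by_sector gics_data)

-- ===== LEMMAS AND PROOFS =====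

-- the tickers of sector s, in input order
def pvBucket (g : List (String × List (String × String))) (s : String) : List String :=
  (g.filter (fun ti => pvSector ti.2 == s)).map Prod.fst

-- A's grouping step equals a plain modify
theorem pvStepA_eq (d : PySem.Dict String (List String)) (ti : String × List (String × String)) :
    PySem.Dict.modify (if d.contains (pvSector ti.2) = true then d else d.insert (pvSector ti.2) [])
      (pvSector ti.2) [] (fun l => l ++ [ti.1])
    = d.modify (pvSector ti.2) [] (fun l => l ++ [ti.1]) := by
  by_cases h : d.contains (pvSector ti.2) = true
  · rw [if_pos h]
  · rw [if_neg h]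
    have h' : d.contains (pvSector ti.2) = false := by simpa using h
    have hg : d.getD (pvSector ti.2) [] = [] := by
      simp [PySem.Dict.getD_of_not_contains, h']
    simp only [PySem.Dict.modify, PySem.Dict.insert_insert_self, PySem.Dict.getD_insert_self, hg]

-- A's grouping fold: value at s is the bucket of s
theorem pvGroup_getD (g : List (String × List (String × String))) (s : String) :
    (g.foldl (fun d ti => d.modify (pvSector ti.2) [] (fun l => l ++ [ti.1])) PySem.Dict.empty).getD s []
    = pvBucket g s := by
  have h := PySem.Dict.getD_foldl_modify_append
    (g.map (fun ti => (pvSector ti.2, ti.1))) PySem.Dict.empty s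
  rw [List.foldl_map] at h
  simp only [h, PySem.Dict.getD_empty, List.nil_append, List.filter_map, pvBucket]
  simp [List.map_map, Function.comp_def]

-- modifying each key of a nodup list exactly once
theorem pvFoldl_modify_once (ks : List String) (hnd : ks.Nodup)
    (d : PySem.Dict String (List String)) (f : List String → List String) (s : String) :
    (ks.foldl (fun d k => d.modify k [] f) d).getD s []
    = if s ∈ ks then f (d.getD s []) else d.getD s [] := by
  induction ks generalizing d with
  | nil => simp
  | cons k t ih =>
    simp only [List.nodup_cons] at hnd
    rw [List.foldl_cons, ih hnd.2]
    simp only [PySem.Dict.getD_modify, List.mem_cons]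
    by_cases hst : s ∈ t
    · have hne : ¬ s = k := fun h => hnd.1 (h ▸ hst)
      simp [hst, hne]
    · by_cases hk : s = k
      · subst hk; simp [hst]
      · simp [hst, hk]

-- adding already-present elements to a Set changes nothing
theorem pvSet_update_self (s : PySem.Set String) (l : List String) (h : ∀ x ∈ l, x ∈ s) :
    PySem.Set.update s l = s := by
  induction l generalizing s with
  | nil => rfl
  | cons x t ih =>
    have hx : PySem.Set.add s x = s := by
      simp [PySem.Set.add, PySem.Set.contains, h x (List.mem_cons_self)]
    simpa [PySem.Set.update, hx] using ih s (fun y hy => h y (List.mem_cons_of_mem _ hy))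

-- filtering a sorted list = sorting the filtered list
theorem pvFilter_sorted (xs : List String) (p : String → Bool) :
    (PySem.List.sorted xs (fun x => x) false).filter p
    = PySem.List.sorted (xs.filter p) (fun x => x) false := by
  refine (PySem.List.sorted_id_eq_of_perm_of_pairwise _ _ ?_ ?_).symm
  · exact (PySem.List.sorted_perm xs (fun x => x) false).filter p
  · exact List.Pairwise.sublist List.filter_sublist
      (PySem.List.sorted_pairwise xs (fun x => x))

-- under nodup ticker keys, looking a ticker of g up in g gives its own info
theorem pvLookup_self (g : List (String × List (String × String)))
    (hnd : (g.map Prod.fst).Nodup) (ti : String × List (String × String)) (hti : ti ∈ g) :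
    (PySem.Dict.mk g).getD ti.1 [] = ti.2 :=
  PySem.Dict.getD_of_mem_items (PySem.Dict.mk g) (by simpa [PySem.Dict.items] using hti)
    (by simpa [PySem.Dict.keys] using hnd) []

-- A's result in closed form
theorem pvA_eq (g : List (String × List (String × String))) :
    get_companies_by_sector g
    = (PySem.Set.ofList (g.map (fun ti => pvSector ti.2))).map
        (fun s => (s, PySem.List.sorted (pvBucket g s) (fun x => x) false)) := by
  unfold get_companies_by_sector
  have hstep : g.foldl (fun sectors ti =>
      let sector := pvSector ti.2
      let sectors := if sectors.contains sector then sectors else sectors.insert sector []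
      sectors.modify sector [] (fun l => l ++ [ti.1])) PySem.Dict.empty
      = g.foldl (fun d ti => d.modify (pvSector ti.2) [] (fun l => l ++ [ti.1])) PySem.Dict.empty :=
    PySem.List.foldl_congr_mem g _ _ PySem.Dict.empty (fun acc ti _ => pvStepA_eq acc ti)
  simp only [hstep]
  set d1 := g.foldl (fun d ti => d.modify (pvSector ti.2) [] (fun l => l ++ [ti.1])) PySem.Dict.empty with hd1
  have hkeys : d1.keys = PySem.Set.ofList (g.map (fun ti => pvSector ti.2)) := by
    rw [hd1, PySem.Dict.keys_foldl_modify_key g (fun ti => pvSector ti.2) []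
      (fun _ ti => (fun l => l ++ [ti.1]))]
    simp [PySem.Dict.keys_empty, PySem.Set.update, PySem.Set.ofList_eq_foldl]
  have hndk : d1.keys.Nodup := by
    rw [hd1]
    exact PySem.Dict.nodup_keys_foldl_modify_key g (fun ti => pvSector ti.2) []
      (fun _ ti => (fun l => l ++ [ti.1])) PySem.Dict.empty (by simp)
  -- the sort pass
  set d2 := d1.keys.foldl (fun d s => d.modify s [] (fun l => PySem.List.sorted l (fun x => x) false)) d1 with hd2
  have hkeys2 : d2.keys = d1.keys := by
    rw [hd2, PySem.Dict.keys_foldl_modify_key d1.keys (fun k => k) []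
      (fun _ _ => (fun l => PySem.List.sorted l (fun x => x) false))]
    simp only [List.map_id']
    exact pvSet_update_self _ _ (fun x hx => hx)
  have hndk2 : d2.keys.Nodup := hkeys2 ▸ hndk
  rw [PySem.Dict.items_eq_map_keys d2 hndk2 [], hkeys2, hkeys]
  refine List.map_congr_left (fun s hs => ?_)
  have hsk : s ∈ d1.keys := hkeys ▸ hs
  rw [hd2, pvFoldl_modify_once d1.keys hndk d1 _ s, if_pos hsk, hd1, pvGroup_getD]

-- ===== VERDICT (by name: the statement is the Claim_ definition above) =====
theorem get_companies_by_sector_spec : Claim_equal_get_companies_by_sector := by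
  intro g _ hpre
  unfold Spec_get_companies_by_sector
  rw [pvA_eq]
  unfold get_companies_by_sector_alt
  have hded : PySem.List.dedup (g.map (fun ti => pvSector ti.2))
      = PySem.Set.ofList (g.map (fun ti => pvSector ti.2)) := rfl
  rw [hded]
  refine List.map_congr_left (fun s _ => ?_)
  have hfm : (g.map Prod.fst).filter
      (fun t => pvSector ((PySem.Dict.mk g).getD t []) == s)
      = (g.filter (fun ti => pvSector ti.2 == s)).map Prod.fst := by
    rw [List.filter_map]
    refine congrArg (List.map Prod.fst) (List.filter_congr (fun ti hti => ?_))
    simp [pvLookup_self g hpre.1 ti hti]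
  rw [pvFilter_sorted, hfm]
  rfl
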